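-- pv_equiv track=rewrite | github.com/czczccc/DevBrain | core/chunking.py | _iter_line_windows
-- ===== SOURCE A (Python) =====
-- from typing import Iterable
--
-- def _iter_line_windows(line_count: int, window_size: int, overlap: int) -> Iterable[tuple[int, int]]:
--     if line_count <= 0:
--         return []
--
--     if window_size <= 0:
--         raise ValueError("window_size must be positive")
--     if overlap < 0:
--         raise ValueError("overlap must not be negative")
--     if overlap >= window_size:
--         raise ValueError("overlap must be smaller than window_size")
--
--     if line_count <= window_size:
--         return [(1, line_count)]
--
--     windows: list[tuple[int, int]] = []
--     step = window_size - overlap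
--     start_line = 1
--
--     while start_line <= line_count:
--         end_line = min(start_line + window_size - 1, line_count)
--         windows.append((start_line, end_line))
--         if end_line >= line_count:
--             break
--         start_line += step
--
--     return windows
-- ===== SOURCE B (Python) =====
-- def _iter_line_windows(line_count, window_size, overlap):
--     if line_count <= 0:
--         return []
--     if window_size <= 0:
--         raise ValueError("window_size must be positive")
--     if overlap < 0:
--         raise ValueError("overlap must not be negative")
--     if overlap >= window_size:
--         raise ValueError("overlap must be smaller than window_size")
--     if line_count <= window_size:
--         return [(1, line_count)]
--     step = window_size - overlap
--     n = (line_count - window_size + step - 1) // step  # ceil((line_count-window_size)/step)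
--     return [(1 + i * step, min(1 + i * step + window_size - 1, line_count))
--             for i in range(n + 1)]
-- ===== Notes on version B (the rewrite author's own statement) =====
-- stated objective: alternative
-- what changed: Replaces A's incremental while-loop with mid-loop break by a closed-form ceil computation of the window count and a single comprehension over range(n+1).
import Mathlib
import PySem

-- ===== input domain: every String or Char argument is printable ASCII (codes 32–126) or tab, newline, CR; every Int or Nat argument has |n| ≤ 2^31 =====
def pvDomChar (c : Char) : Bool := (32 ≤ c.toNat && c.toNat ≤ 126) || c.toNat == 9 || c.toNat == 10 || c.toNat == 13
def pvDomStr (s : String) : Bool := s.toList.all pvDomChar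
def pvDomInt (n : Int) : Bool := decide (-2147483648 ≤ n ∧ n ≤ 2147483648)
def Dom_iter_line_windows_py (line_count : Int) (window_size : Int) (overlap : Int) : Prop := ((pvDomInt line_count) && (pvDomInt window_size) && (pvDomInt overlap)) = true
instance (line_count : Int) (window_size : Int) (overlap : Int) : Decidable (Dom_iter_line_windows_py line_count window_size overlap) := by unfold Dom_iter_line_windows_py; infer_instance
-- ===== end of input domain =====

-- B replaces A's incremental while-loop (with its mid-loop break) by a closed-form ceil
-- computation of the last window index and one comprehension over range(n+1); same cost, different decomposition.

-- ===== PORT A =====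
-- A's while-loop: builds windows from start_line, stepping by `step`, breaking once a window
-- reaches line_count.  Fuel bounds the iteration count (the loop runs at most line_count times
-- whenever it is reached with step ≥ 1, which Pre_ guarantees).
def iterA_loop (lc ws step : Int) : Nat → Int → List (Int × Int)
  | 0, _ => []
  | fuel + 1, start =>
    if start ≤ lc then
      let e := min (start + ws - 1) lc
      (start, e) :: (if e ≥ lc then [] else iterA_loop lc ws step fuel (start + step))
    else []

def iter_line_windows_py (line_count : Int) (window_size : Int) (overlap : Int) : List (Int × Int) :=
  if line_count ≤ 0 then []
  else if window_size ≤ 0 then []      -- Python: raise ValueError (excluded by Pre_)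
  else if overlap < 0 then []          -- Python: raise ValueError (excluded by Pre_)
  else if overlap ≥ window_size then []-- Python: raise ValueError (excluded by Pre_)
  else if line_count ≤ window_size then [(1, line_count)]
  else iterA_loop line_count window_size (window_size - overlap) line_count.toNat 1

-- ===== PORT B =====
def iter_line_windows_py_alt (line_count : Int) (window_size : Int) (overlap : Int) : List (Int × Int) :=
  if line_count ≤ 0 then []
  else if window_size ≤ 0 then []      -- Python: raise ValueError (excluded by Pre_)
  else if overlap < 0 then []          -- Python: raise ValueError (excluded by Pre_)
  else if overlap ≥ window_size then []-- Python: raise ValueError (excluded by Pre_)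
  else if line_count ≤ window_size then [(1, line_count)]
  else
    let step := window_size - overlap
    let n := PySem.Int.floordiv (line_count - window_size + step - 1) step
    (PySem.List.pyRange 0 (n + 1) 1).map
      (fun i => (1 + i * step, min (1 + i * step + window_size - 1) line_count))

-- ===== PRECONDITION & SPEC =====
-- Pre_ excludes exactly the inputs on which A raises ValueError: line_count > 0 together with
-- an invalid configuration (window_size ≤ 0, overlap < 0, or overlap ≥ window_size).
def Pre_iter_line_windows_py (line_count : Int) (window_size : Int) (overlap : Int) : Prop :=
  line_count ≤ 0 ∨ (0 < window_size ∧ 0 ≤ overlap ∧ overlap < window_size)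
instance (line_count : Int) (window_size : Int) (overlap : Int) : Decidable (Pre_iter_line_windows_py line_count window_size overlap) := by unfold Pre_iter_line_windows_py; infer_instance
def pvWitness_iter_line_windows_py : Int × Int × Int := (10, 4, 1)

def Spec_iter_line_windows_py (line_count : Int) (window_size : Int) (overlap : Int) (out : List (Int × Int)) : Prop := out = iter_line_windows_py_alt line_count window_size overlap
instance (line_count : Int) (window_size : Int) (overlap : Int) (out : List (Int × Int)) : Decidable (Spec_iter_line_windows_py line_count window_size overlap out) := by unfold Spec_iter_line_windows_py; infer_instance

-- ===== CLAIM (what is proved, stated in full; the proofs are below) =====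
def Claim_equal_iter_line_windows_py : Prop := ∀ (line_count : Int) (window_size : Int) (overlap : Int), Dom_iter_line_windows_py line_count window_size overlap → Pre_iter_line_windows_py line_count window_size overlap → Spec_iter_line_windows_py line_count window_size overlap (iter_line_windows_py line_count window_size overlap)

-- ===== LEMMAS AND PROOFS =====

-- A's loop, started at start_line = 1 + i*step, produces exactly the windows i, i+1, …, n,
-- where n is the least index whose window reaches line_count.
theorem iterA_loop_eq (lc ws step n : Int) (hstep : 1 ≤ step) (hws : step ≤ ws) (_hlt : ws < lc)
    (hn1 : lc - ws ≤ n * step) (hn2 : (n - 1) * step < lc - ws) :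
    ∀ (fuel : Nat) (i : Int), 0 ≤ i → i ≤ n → (n - i).toNat < fuel →
      iterA_loop lc ws step fuel (1 + i * step) =
        (PySem.List.pyRange i (n + 1) 1).map
          (fun j => (1 + j * step, min (1 + j * step + ws - 1) lc)) := by
  intro fuel
  induction fuel with
  | zero => intro i _ _ h; omega
  | succ fuel ih =>
    intro i hi0 hin hfuel
    have histep : i * step ≤ n * step := by
      exact mul_le_mul_of_nonneg_right hin (by omega)
    have hstart : 1 + i * step ≤ lc := by nlinarith
    rcases eq_or_lt_of_le hin with heq | hlt'
    · subst heq
      rw [PySem.List.pyRange_one_cons (by omega), PySem.List.pyRange_one_eq_nil (by omega)]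
      simp only [iterA_loop, if_pos hstart, List.map]
      rw [if_pos (by omega : min (1 + i * step + ws - 1) lc ≥ lc)]
    · have hi1 : i ≤ n - 1 := by omega
      have hsm : i * step ≤ (n - 1) * step := mul_le_mul_of_nonneg_right hi1 (by omega)
      have he : min (1 + i * step + ws - 1) lc = 1 + i * step + ws - 1 := by omega
      rw [PySem.List.pyRange_one_cons (by omega)]
      simp only [iterA_loop, if_pos hstart, List.map]
      rw [if_neg (by omega : ¬ min (1 + i * step + ws - 1) lc ≥ lc)]
      have harg : 1 + i * step + step = 1 + (i + 1) * step := by ring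
      rw [harg, ih (i + 1) (by omega) (by omega) (by omega)]

-- ===== VERDICT (by name: the statement is the Claim_ definition above) =====
theorem iter_line_windows_py_spec : Claim_equal_iter_line_windows_py := by
  intro lc ws ov _ hpre
  unfold Spec_iter_line_windows_py iter_line_windows_py iter_line_windows_py_alt
  split_ifs with h1 h2 h3 h4 h5
  · rfl
  · rfl
  · rfl
  · rfl
  · rfl
  · -- main branch: lc > ws > ov ≥ 0
    rcases hpre with h | ⟨hws, hov0, hovws⟩
    · omega
    set step := ws - ov with hstepdef
    have hstep : 1 ≤ step := by omega
    set n := PySem.Int.floordiv (lc - ws + step - 1) step with hn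
    have hdm := PySem.Int.floordiv_mul_add_mod (lc - ws + step - 1) step
    have hm0 := PySem.Int.mod_nonneg (lc - ws + step - 1) (by omega : (0:Int) < step)
    have hm1 := PySem.Int.mod_lt (lc - ws + step - 1) (by omega : (0:Int) < step)
    rw [← hn] at hdm
    have hn1 : lc - ws ≤ n * step := by nlinarith
    have hn2 : (n - 1) * step < lc - ws := by nlinarith
    have hn0 : 0 ≤ n := by nlinarith
    have hnlt : n < lc := by nlinarith
    have := iterA_loop_eq lc ws step n hstep (by omega) (by omega) hn1 hn2
      lc.toNat 0 (by omega) hn0 (by omega)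
    simpa using this
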